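-- pv_equiv track=rewrite | github.com/baddyscience/develop | algorithmTopic/最大战力.py | solution
-- ===== SOURCE A (Python) =====
-- def solution(n, m, array):
--     # 初始化战力值限制数组
--     max_arrays = [float('inf')] * n
--     for idx, maxPower in array:
--         max_arrays[idx] = maxPower
--
--     # 从左到右推导最大可能的战力值
--     power = [0] * n
--     for i in range(1, n):
--         power[i] = min(power[i - 1] + 1, max_arrays[i])
--
--     # 从右到左调整
--     for i in range(n - 2, -1, -1):
--         power[i] = min(power[i], power[i + 1] + 1)
--
--     # 返回所有角色中的最大战力值
--     return max(power)
-- ===== SOURCE B (Python) =====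
-- def solution(n, m, array):
--     # Caps per position, later entries overwriting earlier ones; position 0's power is fixed at 0.
--     caps = dict(array)
--     caps[0] = 0
--     # A position's best power is the tightest constraint propagated over the distance to it.
--     return max(min(v + abs(i - j) for j, v in caps.items()) for i in range(n))
-- ===== Notes on version B (the rewrite author's own statement) =====
-- stated objective: alternative
-- what changed: Replaces A's two in-place relaxation sweeps over a mutable power list by a closed form: a last-write-wins caps dict (with position 0 fixed at power 0) is built once and each position's value is the min over all caps of (cap + distance), of which the maximum is returned; Pre_ keeps to the problem's natural domain n >= 1 with constraint indices in [0, n) -- out-of-range indices make A raise IndexError, and negative in-range indices only return in A through Python's negative-index list wraparound, an accident outside the problem's domain.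
-- outside the precondition, e.g. on solution(2, 0, [(-1, 0)]): A returns 0, B returns 1
import Mathlib
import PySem

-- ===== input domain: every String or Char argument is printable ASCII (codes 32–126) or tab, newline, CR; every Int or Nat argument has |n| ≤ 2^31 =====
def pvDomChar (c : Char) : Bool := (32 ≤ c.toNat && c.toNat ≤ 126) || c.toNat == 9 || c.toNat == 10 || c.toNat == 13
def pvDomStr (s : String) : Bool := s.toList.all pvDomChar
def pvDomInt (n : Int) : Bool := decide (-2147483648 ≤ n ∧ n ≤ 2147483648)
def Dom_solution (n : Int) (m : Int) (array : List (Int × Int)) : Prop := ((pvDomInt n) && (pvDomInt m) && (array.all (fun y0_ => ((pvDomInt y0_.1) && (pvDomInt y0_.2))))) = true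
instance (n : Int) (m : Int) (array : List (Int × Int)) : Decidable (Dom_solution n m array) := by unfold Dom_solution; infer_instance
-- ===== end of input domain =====

-- B replaces A's two relaxation sweeps over a mutable power list by a per-position closed-form
-- min over a last-write-wins caps dict with position 0 fixed at power 0.
-- Equivalence of the RETURN values is proved on Pre_ (the problem's natural domain).

-- ===== PORT A =====
-- min(x, y) where y is max_arrays[i]: none stands for float('inf'), so min with none is x
def pvMinInf (x : Int) (y : Option Int) : Int :=
  match y with
  | none => x
  | some v => min x v

-- Python lists are arrays: the ports of A's `power`/`max_arrays` use `Array` so that evaluation is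
-- linear. pvAGet/pvASet are exactly Python's xs[i] read / xs[i] = v write (negative i from the
-- end, out of range = IndexError): the index rule is PySem.List.pyIdx?, and the default/no-op
-- branches are unreachable under Pre_ (indexes in range).
def pvAGet {α : Type} (xs : Array α) (i : Int) (d : α) : α :=
  match PySem.List.pyIdx? xs.size i with
  | some k => xs.getD k d
  | none => d

def pvASet {α : Type} (xs : Array α) (i : Int) (v : α) : Array α :=
  match PySem.List.pyIdx? xs.size i with
  | some k => xs.setIfInBounds k v
  | none => xs

def solution (n : Int) (m : Int) (array : List (Int × Int)) : Int :=
  -- max_arrays = [float('inf')] * n ; for idx, maxPower in array: max_arrays[idx] = maxPower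
  let ma : Array (Option Int) :=
    array.foldl (fun ma p => pvASet ma p.1 (some p.2)) (Array.replicate n.toNat none)
  -- power = [0] * n ; for i in range(1, n): power[i] = min(power[i-1] + 1, max_arrays[i])
  let power : Array Int := Array.replicate n.toNat 0
  let power := (PySem.List.pyRange 1 n 1).foldl
    (fun pw i =>
      pvASet pw i (pvMinInf (pvAGet pw (i - 1) 0 + 1) (pvAGet ma i none)))
    power
  -- for i in range(n-2, -1, -1): power[i] = min(power[i], power[i+1] + 1)
  let power := (PySem.List.pyRange (n - 2) (-1) (-1)).foldl
    (fun pw i =>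
      pvASet pw i (min (pvAGet pw i 0) (pvAGet pw (i + 1) 0 + 1)))
    power
  -- return max(power)   (raises on empty: Pre_ demands 1 ≤ n; .getD 0 is unreachable under Pre_)
  (PySem.List.max? power.toList (fun x => x)).getD 0

-- ===== PORT B =====
def solution_alt (n : Int) (m : Int) (array : List (Int × Int)) : Int :=
  -- caps = dict(array); caps[0] = 0
  let caps : PySem.Dict Int Int := (PySem.Dict.ofList array).insert 0 0
  -- return max(min(v + abs(i - j) for j, v in caps.items()) for i in range(n))
  -- caps is nonempty (it holds key 0) so the inner min() returns; the outer max() raises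
  -- on an empty range: .getD 0 is unreachable under Pre_
  let vals := (PySem.List.pyRange 0 n 1).map (fun i =>
    (PySem.List.min? (caps.items.map (fun jv => jv.2 + |i - jv.1|)) (fun x => x)).getD 0)
  (PySem.List.max? vals (fun x => x)).getD 0

-- ===== PRECONDITION & SPEC =====
-- Pre_ keeps to the problem's natural domain: n ≥ 1 (else A's max() on an empty list raises) and
-- every constraint index in [0, n) — an index outside [-n, n) makes A raise IndexError, and a
-- negative in-range index only returns in A through Python's negative-index list wraparound,
-- an accident of the list representation, outside the problem's domain (B does not match there).
def Pre_solution (n : Int) (m : Int) (array : List (Int × Int)) : Prop :=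
  1 ≤ n ∧ ∀ p ∈ array, 0 ≤ p.1 ∧ p.1 < n
instance (n : Int) (m : Int) (array : List (Int × Int)) : Decidable (Pre_solution n m array) := by
  unfold Pre_solution; infer_instance
def pvWitness_solution : Int × Int × (List (Int × Int)) := (3, 0, [(1, 5), (0, 7)])

def Spec_solution (n : Int) (m : Int) (array : List (Int × Int)) (out : Int) : Prop := out = solution_alt n m array
instance (n : Int) (m : Int) (array : List (Int × Int)) (out : Int) : Decidable (Spec_solution n m array out) := by unfold Spec_solution; infer_instance

-- ===== CLAIM (what is proved, stated in full; the proofs are below) =====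
def Claim_equal_solution : Prop := ∀ (n : Int) (m : Int) (array : List (Int × Int)), Dom_solution n m array → Pre_solution n m array → Spec_solution n m array (solution n m array)
-- ===== LEMMAS AND PROOFS =====

-- pvAGet / pvASet agree with the PySem list primitives through toList
theorem pvAGet_toList {α : Type} (xs : Array α) (i : Int) (d : α) :
    pvAGet xs i d = PySem.List.pyGetD xs.toList i d := by
  unfold pvAGet PySem.List.pyGetD PySem.List.pyGet?
  rw [show xs.toList.length = xs.size from Array.length_toList]
  cases h : PySem.List.pyIdx? xs.size i with
  | none => rfl
  | some k =>
    simp only [Option.bind_some, Array.getD_eq_getD_getElem?, ← Array.getElem?_toList]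

theorem pvASet_toList {α : Type} (xs : Array α) (i : Int) (v : α) :
    (pvASet xs i v).toList = PySem.List.pySetD xs.toList i v := by
  unfold pvASet PySem.List.pySetD PySem.List.pySet?
  rw [show xs.toList.length = xs.size from Array.length_toList]
  cases h : PySem.List.pyIdx? xs.size i with
  | none => rfl
  | some k => simp [Array.toList_setIfInBounds]

-- the three loops of A over Array states, seen through toList
theorem pvBuildBridge : ∀ (l : List (Int × Int)) (arr : Array (Option Int)),
    (l.foldl (fun ma p => pvASet ma p.1 (some p.2)) arr).toList
      = l.foldl (fun ma p => PySem.List.pySetD ma p.1 (some p.2)) arr.toList := by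
  intro l
  induction l with
  | nil => intro arr; rfl
  | cons p ps ih =>
    intro arr
    rw [List.foldl_cons, List.foldl_cons, ih, pvASet_toList]

theorem pvLeftBridge (ma : Array (Option Int)) : ∀ (l : List Int) (arr : Array Int),
    (l.foldl (fun pw i => pvASet pw i (pvMinInf (pvAGet pw (i - 1) 0 + 1) (pvAGet ma i none))) arr).toList
      = l.foldl (fun pw i => PySem.List.pySetD pw i
          (pvMinInf (PySem.List.pyGetD pw (i - 1) 0 + 1) (PySem.List.pyGetD ma.toList i none))) arr.toList := by
  intro l
  induction l with
  | nil => intro arr; rfl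
  | cons j js ih =>
    intro arr
    rw [List.foldl_cons, List.foldl_cons, ih, pvASet_toList, pvAGet_toList, pvAGet_toList]

theorem pvRightBridge : ∀ (l : List Int) (arr : Array Int),
    (l.foldl (fun pw i => pvASet pw i (min (pvAGet pw i 0) (pvAGet pw (i + 1) 0 + 1))) arr).toList
      = l.foldl (fun pw i => PySem.List.pySetD pw i
          (min (PySem.List.pyGetD pw i 0) (PySem.List.pyGetD pw (i + 1) 0 + 1))) arr.toList := by
  intro l
  induction l with
  | nil => intro arr; rfl
  | cons j js ih =>
    intro arr
    rw [List.foldl_cons, List.foldl_cons, ih, pvASet_toList, pvAGet_toList, pvAGet_toList]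

-- fold of `min` over the `some`-values of `sel` on `l`, seeded with `init`
def pvOmin {α : Type} (sel : α → Option Int) (init : Int) (l : List α) : Int :=
  l.foldl (fun a x => match sel x with | some y => min a y | none => a) init

theorem pvOmin_le_init {α : Type} (sel : α → Option Int) (init : Int) (l : List α) :
    pvOmin sel init l ≤ init := by
  induction l generalizing init with
  | nil => simp [pvOmin]
  | cons x xs ih =>
    simp only [pvOmin, List.foldl_cons]
    cases h : sel x with
    | none => exact ih init
    | some y => exact le_trans (ih _) (min_le_left _ _)

theorem pvOmin_le_of_mem {α : Type} {sel : α → Option Int} {init : Int} {l : List α}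
    {x : α} {y : Int} (hx : x ∈ l) (hs : sel x = some y) : pvOmin sel init l ≤ y := by
  induction l generalizing init with
  | nil => simp at hx
  | cons a as ih =>
    simp only [pvOmin, List.foldl_cons]
    rcases List.mem_cons.1 hx with rfl | hmem
    · rw [hs]
      exact le_trans (pvOmin_le_init _ _ _) (min_le_right _ _)
    · cases h : sel a <;> exact ih hmem

theorem le_pvOmin {α : Type} {sel : α → Option Int} {init c : Int} {l : List α}
    (h0 : c ≤ init) (h : ∀ x ∈ l, ∀ y, sel x = some y → c ≤ y) : c ≤ pvOmin sel init l := by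
  induction l generalizing init with
  | nil => simpa [pvOmin]
  | cons a as ih =>
    simp only [pvOmin, List.foldl_cons]
    cases hs : sel a with
    | none => exact ih h0 (fun x hx => h x (List.mem_cons_of_mem _ hx))
    | some y =>
      exact ih (le_min h0 (h a (List.mem_cons_self) y hs))
        (fun x hx => h x (List.mem_cons_of_mem _ hx))

theorem pvOmin_attained {α : Type} (sel : α → Option Int) (init : Int) (l : List α) :
    pvOmin sel init l = init ∨ ∃ x ∈ l, sel x = some (pvOmin sel init l) := by
  induction l generalizing init with
  | nil => left; simp [pvOmin]
  | cons a as ih =>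
    simp only [pvOmin, List.foldl_cons]
    cases hs : sel a with
    | none =>
      rcases ih init with h | ⟨x, hx, h⟩
      · left; exact h
      · right; exact ⟨x, List.mem_cons_of_mem _ hx, h⟩
    | some y =>
      rcases ih (min init y) with h | ⟨x, hx, h⟩
      · rcases le_total init y with hy | hy
        · left; show pvOmin sel (min init y) as = init
          rw [h, min_eq_left hy]
        · right
          refine ⟨a, List.mem_cons_self, ?_⟩
          show sel a = some (pvOmin sel (min init y) as)
          rw [hs, h, min_eq_right hy]
      · right; exact ⟨x, List.mem_cons_of_mem _ hx, h⟩

theorem pvOmin_sel_congr {α : Type} {sel₁ sel₂ : α → Option Int} {init : Int} {l : List α}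
    (h : ∀ x ∈ l, sel₁ x = sel₂ x) : pvOmin sel₁ init l = pvOmin sel₂ init l := by
  induction l generalizing init with
  | nil => rfl
  | cons a as ih =>
    simp only [pvOmin, List.foldl_cons, h a List.mem_cons_self]
    exact ih (fun x hx => h x (List.mem_cons_of_mem _ hx))

theorem pvOmin_add {α : Type} (sel : α → Option Int) (init c : Int) (l : List α) :
    pvOmin (fun x => (sel x).map (· + c)) (init + c) l = pvOmin sel init l + c := by
  induction l generalizing init with
  | nil => rfl
  | cons a as ih =>
    simp only [pvOmin, List.foldl_cons]
    cases hs : sel a with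
    | none => simpa [hs] using ih init
    | some y =>
      simp only [Option.map_some]
      rw [show min (init + c) (y + c) = min init y + c from min_add_add_right init y c]
      exact ih (min init y)

-- the candidate cost at source j for position i (none = no source at j; j = 0 is the origin,
-- already accounted for by the seed i)
def pvSelM (gf : Nat → Option Int) (i : Nat) : Nat → Option Int :=
  fun j => if j = 0 then none else (gf j).map (fun v => v + |(i : Int) - (j : Int)|)

def pvM (gf : Nat → Option Int) (N i : Nat) : Int := pvOmin (pvSelM gf i) (i : Int) (List.range N)

def pvSelL (gf : Nat → Option Int) (i : Nat) : Nat → Option Int :=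
  fun j => if j = 0 then none else (gf j).map (fun v => v + ((i : Int) - (j : Int)))

def pvML (gf : Nat → Option Int) (i : Nat) : Int := pvOmin (pvSelL gf i) (i : Int) (List.range (i + 1))

def pvL (gf : Nat → Option Int) : Nat → Int
  | 0 => 0
  | i + 1 => pvMinInf (pvL gf i + 1) (gf (i + 1))

def pvRf (gf : Nat → Option Int) : Nat → Nat → Int
  | 0, k => pvL gf k
  | t + 1, k => min (pvL gf k) (pvRf gf t (k + 1) + 1)

def pvR (gf : Nat → Option Int) (N k : Nat) : Int := pvRf gf (N - 1 - k) k

theorem pvL_eq_ML (gf : Nat → Option Int) (i : Nat) : pvL gf i = pvML gf i := by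
  induction i with
  | zero =>
    simp [pvL, pvML, pvOmin, List.range_succ, pvSelL]
  | succ i ih =>
    have hrange : List.range (i + 1 + 1) = List.range (i + 1) ++ [i + 1] := List.range_succ
    have hfold : pvOmin (pvSelL gf (i + 1)) ((i : Int) + 1) (List.range (i + 1)) = pvML gf i + 1 := by
      have hsel : ∀ x ∈ List.range (i + 1),
          pvSelL gf (i + 1) x = ((pvSelL gf i x).map (· + 1)) := by
        intro x hx
        simp only [pvSelL]
        by_cases hx0 : x = 0
        · simp [hx0]
        · simp only [hx0, if_false, Option.map_map]
          cases gf x <;> simp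
          push_cast; ring
      rw [pvOmin_sel_congr hsel]
      exact pvOmin_add (pvSelL gf i) (i : Int) 1 (List.range (i + 1))
    have : pvML gf (i + 1) = pvMinInf (pvML gf i + 1) (gf (i + 1)) := by
      unfold pvML
      rw [hrange]
      unfold pvOmin
      rw [List.foldl_append]
      simp only [List.foldl_cons, List.foldl_nil]
      have h1 : ((i + 1 : Nat) : Int) = (i : Int) + 1 := by push_cast; ring
      -- reduce the last step
      show (match pvSelL gf (i+1) (i+1) with
            | some y => min (pvOmin (pvSelL gf (i+1)) (((i+1 : Nat)):Int) (List.range (i+1))) y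
            | none => pvOmin (pvSelL gf (i+1)) (((i+1 : Nat)):Int) (List.range (i+1))) = _
      rw [h1, hfold]
      simp only [pvSelL, Nat.succ_ne_zero, if_false]
      cases hg : gf (i + 1) with
      | none => simp only [pvMinInf]; rfl
      | some v =>
        simp only [Option.map_some, pvMinInf]
        rw [show v + (((i+1 : Nat) : Int) - ((i+1 : Nat) : Int)) = v by ring]
        show min (pvML gf i + 1) v = min (pvML gf i + 1) v
        rfl
    rw [pvL, ih, this]

theorem pvM_last (gf : Nat → Option Int) (N : Nat) (hN : 1 ≤ N) :
    pvM gf N (N - 1) = pvML gf (N - 1) := by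
  unfold pvM pvML
  rw [show N - 1 + 1 = N by omega]
  apply pvOmin_sel_congr
  intro j hj
  have hj' : j < N := List.mem_range.1 hj
  simp only [pvSelM, pvSelL]
  by_cases h0 : j = 0
  · simp [h0]
  · simp only [h0, if_false]
    congr 1
    funext v
    congr 1
    rw [abs_of_nonneg]
    omega

theorem pvM_rec (gf : Nat → Option Int) (N i : Nat) (h : i + 1 < N) :
    pvM gf N i = min (pvML gf i) (pvM gf N (i + 1) + 1) := by
  apply le_antisymm
  · apply le_min
    · -- pvM ≤ pvML i
      rcases pvOmin_attained (pvSelL gf i) (i : Int) (List.range (i + 1)) with ha | ⟨j, hj, hs⟩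
      · rw [pvML, ha]; exact pvOmin_le_init _ _ _
      · have hj' : j < i + 1 := List.mem_range.1 hj
        have h0 : j ≠ 0 := by
          intro h0; rw [h0] at hs; simp [pvSelL] at hs
        rcases Option.map_eq_some_iff.1 (by simpa [pvSelL, h0] using hs) with ⟨v, hv, hval⟩
        have hsm : pvSelM gf i j = some (v + |(i : Int) - (j : Int)|) := by
          simp [pvSelM, h0, hv]
        have habs : |(i : Int) - (j : Int)| = (i : Int) - (j : Int) := by
          rw [abs_of_nonneg]; omega
        have : pvM gf N i ≤ v + |(i : Int) - (j : Int)| :=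
          pvOmin_le_of_mem (List.mem_range.2 (by omega)) hsm
        rw [habs, hval] at this
        exact le_of_eq_of_le rfl (by rw [pvML]; exact this)
    · -- pvM i ≤ pvM (i+1) + 1
      rcases pvOmin_attained (pvSelM gf (i + 1)) ((i : Int) + 1) (List.range N) with ha | ⟨j, hj, hs⟩
      · have : pvM gf N (i + 1) = (i : Int) + 1 := by
          rw [pvM, show (((i + 1 : Nat)) : Int) = (i : Int) + 1 by push_cast; ring]; exact ha
        rw [this]
        calc pvM gf N i ≤ (i : Int) := pvOmin_le_init _ _ _
          _ ≤ (i : Int) + 1 + 1 := by omega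
      · have hj' : j < N := List.mem_range.1 hj
        have h0 : j ≠ 0 := by
          intro h0; rw [h0] at hs; simp [pvSelM] at hs
        rcases Option.map_eq_some_iff.1 (by simpa [pvSelM, h0] using hs) with ⟨v, hv, hval⟩
        have hsm : pvSelM gf i j = some (v + |(i : Int) - (j : Int)|) := by
          simp [pvSelM, h0, hv]
        have h1 : pvM gf N i ≤ v + |(i : Int) - (j : Int)| := pvOmin_le_of_mem hj hsm
        have h2 : pvM gf N (i + 1) = v + |((i + 1 : Nat) : Int) - (j : Int)| := by
          rw [pvM]
          push_cast
          exact hval.symm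
        have : |(i : Int) - (j : Int)| ≤ |((i + 1 : Nat) : Int) - (j : Int)| + 1 := by
          push_cast
          rcases abs_cases ((i : Int) - j) with ⟨e1, _⟩ | ⟨e1, _⟩ <;>
            rcases abs_cases ((i : Int) + 1 - j) with ⟨e2, _⟩ | ⟨e2, _⟩ <;> omega
        rw [h2]
        omega
  · -- min(...) ≤ every candidate of pvM i
    apply le_pvOmin
    · exact le_trans (min_le_left _ _) (by rw [pvML]; exact pvOmin_le_init _ _ _)
    · intro j hj y hs
      have hj' : j < N := List.mem_range.1 hj
      have h0 : j ≠ 0 := by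
        intro h0; rw [h0] at hs; simp [pvSelM] at hs
      rcases Option.map_eq_some_iff.1 (by simpa [pvSelM, h0] using hs) with ⟨v, hv, hval⟩
      by_cases hle : j ≤ i
      · -- left part: pvML i ≤ y
        have hsl : pvSelL gf i j = some (v + ((i : Int) - (j : Int))) := by
          simp [pvSelL, h0, hv]
        have h1 : pvML gf i ≤ v + ((i : Int) - (j : Int)) :=
          pvOmin_le_of_mem (List.mem_range.2 (by omega)) hsl
        have habs : |(i : Int) - (j : Int)| = (i : Int) - (j : Int) := by
          rw [abs_of_nonneg]; omega
        calc min (pvML gf i) (pvM gf N (i + 1) + 1) ≤ pvML gf i := min_le_left _ _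
          _ ≤ v + ((i : Int) - (j : Int)) := h1
          _ = y := by rw [← hval, habs]
      · -- right part: pvM (i+1) + 1 ≤ y
        have hgt : i < j := by omega
        have hsm : pvSelM gf (i + 1) j = some (v + |((i + 1 : Nat) : Int) - (j : Int)|) := by
          simp [pvSelM, h0, hv]
        have h1 : pvM gf N (i + 1) ≤ v + |((i + 1 : Nat) : Int) - (j : Int)| :=
          pvOmin_le_of_mem hj hsm
        have habs : |((i + 1 : Nat) : Int) - (j : Int)| + 1 = |(i : Int) - (j : Int)| := by
          push_cast
          rcases abs_cases ((i : Int) + 1 - j) with ⟨e1, _⟩ | ⟨e1, _⟩ <;>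
            rcases abs_cases ((i : Int) - j) with ⟨e2, _⟩ | ⟨e2, _⟩ <;> omega
        calc min (pvML gf i) (pvM gf N (i + 1) + 1) ≤ pvM gf N (i + 1) + 1 := min_le_right _ _
          _ ≤ v + |((i + 1 : Nat) : Int) - (j : Int)| + 1 := by omega
          _ = y := by push_cast at habs ⊢; omega

theorem pvR_eq_M (gf : Nat → Option Int) (N : Nat) :
    ∀ t k, k < N → N - 1 - k = t → pvRf gf t k = pvM gf N k := by
  intro t
  induction t with
  | zero =>
    intro k hk ht
    have hk' : k = N - 1 := by omega
    subst hk'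
    rw [pvRf, pvL_eq_ML, pvM_last gf N (by omega)]
  | succ t ih =>
    intro k hk ht
    have h1 : k + 1 < N := by omega
    rw [pvRf, pvL_eq_ML, ih (k + 1) h1 (by omega), ← pvM_rec gf N k h1]

-- setting index i of the "frontier" map turns `if k < i` into `if k < i + 1`
theorem pvSet_map_range {β : Type} (F G : Nat → β) (N i : Nat) (hi : i < N) :
    ((List.range N).map (fun k => if k < i then F k else G k)).set i (F i)
      = (List.range N).map (fun k => if k < i + 1 then F k else G k) := by
  apply List.ext_getElem
  · simp
  · intro k hk1 hk2
    simp only [List.length_set, List.length_map, List.length_range] at hk1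
    by_cases hki : k = i
    · subst hki
      simp [List.getElem_set, hi]
    · rw [List.getElem_set, if_neg (fun h => hki (h.symm))]
      rw [List.getElem_map, List.getElem_map]
      simp only [List.getElem_range]
      by_cases h : k < i
      · rw [if_pos h, if_pos (by omega)]
      · rw [if_neg h, if_neg (by omega)]

-- setting index i of the map `if k < i + 1 then F k else G k` to `G i` moves the frontier left
theorem pvSet_map_range' {β : Type} (F G : Nat → β) (N i : Nat) (hi : i < N) :
    ((List.range N).map (fun k => if k < i + 1 then F k else G k)).set i (G i)
      = (List.range N).map (fun k => if k < i then F k else G k) := by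
  apply List.ext_getElem
  · simp
  · intro k hk1 hk2
    simp only [List.length_set, List.length_map, List.length_range] at hk1
    by_cases hki : k = i
    · subst hki
      simp [hi]
    · rw [List.getElem_set, if_neg (fun h => hki (h.symm))]
      rw [List.getElem_map, List.getElem_map]
      simp only [List.getElem_range]
      by_cases h : k < i
      · rw [if_pos h, if_pos (by omega)]
      · rw [if_neg h, if_neg (by omega)]

-- left-to-right pass of A computes pvL
theorem pvLeftPass (n : Int) (ma : List (Option Int))
    (g : Nat → Option Int) (hg : ∀ k : Nat, g k = PySem.List.pyGetD ma (k : Int) none) :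
    ∀ (fuel i : Nat), i + fuel = n.toNat → 1 ≤ i →
    (PySem.List.pyRange (i : Int) n 1).foldl
        (fun pw j => PySem.List.pySetD pw j
          (pvMinInf (PySem.List.pyGetD pw (j - 1) 0 + 1) (PySem.List.pyGetD ma j none)))
        ((List.range n.toNat).map (fun k => if k < i then pvL g k else 0))
      = (List.range n.toNat).map (pvL g) := by
  intro fuel
  induction fuel with
  | zero =>
    intro i hi h1
    rw [PySem.List.pyRange_one_eq_nil (by omega)]
    simp only [List.foldl_nil]
    apply List.map_congr_left
    intro k hk
    rw [if_pos (by simpa using List.mem_range.1 hk |>.trans_le (by omega))]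
  | succ fuel ih =>
    intro i hi h1
    have hiN : i < n.toNat := by omega
    rw [PySem.List.pyRange_one_cons (by omega), List.foldl_cons]
    have hlen : ((List.range n.toNat).map (fun k => if k < i then pvL g k else 0)).length = n.toNat := by
      simp
    -- the index reads
    have hread1 : PySem.List.pyGetD
        ((List.range n.toNat).map (fun k => if k < i then pvL g k else 0)) ((i : Int) - 1) 0
        = pvL g (i - 1) := by
      rw [show ((i : Int) - 1) = ((i - 1 : Nat) : Int) by omega, PySem.List.pyGetD_natCast,
        PySem.List.getD_map_range _ _ _ _ (by omega), if_pos (by omega)]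
    have hread2 : PySem.List.pyGetD ma (i : Int) none = g i := (hg i).symm
    have hval : pvMinInf (pvL g (i - 1) + 1) (g i) = pvL g i := by
      rw [show i = (i - 1) + 1 by omega]
      rfl
    have hset : PySem.List.pySetD
        ((List.range n.toNat).map (fun k => if k < i then pvL g k else 0)) (i : Int) (pvL g i)
        = (List.range n.toNat).map (fun k => if k < i + 1 then pvL g k else 0) := by
      rw [PySem.List.pySetD_natCast, pvSet_map_range _ _ _ _ hiN]
    rw [hread1, hread2, hval, hset,
      show ((i : Int) + 1) = ((i + 1 : Nat) : Int) by omega]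
    exact ih (i + 1) (by omega) (by omega)

-- the right-to-left pass of A computes pvR
theorem pvRightPass (n : Int) (g : Nat → Option Int) (hn : 1 ≤ n) :
    ∀ (fuel : Nat) (i : Int), (i + 1).toNat = fuel → -1 ≤ i → i ≤ n - 2 →
    (PySem.List.pyRange i (-1) (-1)).foldl
        (fun pw j => PySem.List.pySetD pw j
          (min (PySem.List.pyGetD pw j 0) (PySem.List.pyGetD pw (j + 1) 0 + 1)))
        ((List.range n.toNat).map (fun (k : Nat) => if i < (k : Int) then pvR g n.toNat k else pvL g k))
      = (List.range n.toNat).map (pvR g n.toNat) := by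
  intro fuel
  induction fuel with
  | zero =>
    intro i hfi h1 h2
    have hi : i = -1 := by omega
    subst hi
    rw [PySem.List.pyRange_neg_one_eq_nil (by omega)]
    simp only [List.foldl_nil]
    apply List.map_congr_left
    intro k _
    rw [if_pos (by omega)]
  | succ fuel ih =>
    intro i hfi h1 h2
    have hi0 : 0 ≤ i := by omega
    have hkN : i.toNat < n.toNat := by omega
    have hk1N' : i.toNat + 1 < n.toNat := by omega
    rw [PySem.List.pyRange_neg_one_cons (by omega), List.foldl_cons]
    have hcast : i = ((i.toNat : Nat) : Int) := by omega
    have hread1 : PySem.List.pyGetD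
        ((List.range n.toNat).map (fun (k : Nat) => if i < (k : Int) then pvR g n.toNat k else pvL g k)) i 0
        = pvL g i.toNat := by
      rw [hcast, PySem.List.pyGetD_natCast, PySem.List.getD_map_range _ _ _ _ hkN,
        if_neg (by omega)]
      congr 1
    have hread2 : PySem.List.pyGetD
        ((List.range n.toNat).map (fun (k : Nat) => if i < (k : Int) then pvR g n.toNat k else pvL g k)) (i + 1) 0
        = pvR g n.toNat (i.toNat + 1) := by
      rw [show (i + 1) = ((i.toNat + 1 : Nat) : Int) by omega, PySem.List.pyGetD_natCast,
        PySem.List.getD_map_range _ _ _ _ hk1N', if_pos (by push_cast; omega)]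
    have hval : min (pvL g i.toNat) (pvR g n.toNat (i.toNat + 1) + 1) = pvR g n.toNat i.toNat := by
      unfold pvR
      rw [show n.toNat - 1 - i.toNat = (n.toNat - 1 - (i.toNat + 1)) + 1 by omega]
      rfl
    have hset : PySem.List.pySetD
        ((List.range n.toNat).map (fun (k : Nat) => if i < (k : Int) then pvR g n.toNat k else pvL g k)) i
        (pvR g n.toNat i.toNat)
        = (List.range n.toNat).map (fun (k : Nat) => if i - 1 < (k : Int) then pvR g n.toNat k else pvL g k) := by
      rw [hcast, PySem.List.pySetD_natCast]
      simp only [Int.toNat_natCast]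
      rw [show ((List.range n.toNat).map (fun (k : Nat) => if ((i.toNat : Nat) : Int) < (k : Int) then pvR g n.toNat k else pvL g k))
          = (List.range n.toNat).map (fun k => if k < i.toNat + 1 then pvL g k else pvR g n.toNat k) from
        List.map_congr_left (fun k _ => by
          by_cases h : ((i.toNat : Nat) : Int) < (k : Int)
          · rw [if_pos h, if_neg (by omega)]
          · rw [if_neg h, if_pos (by omega)])]
      rw [pvSet_map_range' (pvL g) (pvR g n.toNat) _ _ hkN]
      apply List.map_congr_left
      intro k _
      by_cases h : k < i.toNat
      · rw [if_pos h, if_neg (by omega)]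
      · rw [if_neg h, if_pos (by omega)]
    rw [hread1, hread2, hval, hset]
    exact ih (i - 1) (by omega) (by omega) (by omega)

-- min? of a NONEMPTY list with identity key: the result is a member and a lower bound
theorem pvMinChar (xs : List Int) (hne : xs ≠ []) :
    (PySem.List.min? xs (fun y => y)).getD 0 ∈ xs
      ∧ ∀ y ∈ xs, (PySem.List.min? xs (fun y => y)).getD 0 ≤ y := by
  cases hm : PySem.List.min? xs (fun y => y) with
  | none => exact absurd ((PySem.List.min?_eq_none_iff _ _).1 hm) hne
  | some m =>
    simp only [Option.getD_some]
    exact ⟨PySem.List.min?_mem hm, fun y hy => PySem.List.min?_isMin hm y hy⟩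

-- during the build loop, the dict keyed by idx and the list written at idx agree (indices in [0, n))
theorem pvLink (n : Int) (hn : 0 < n) :
    ∀ (l : List (Int × Int)) (ma : List (Option Int)) (d : PySem.Dict Int Int),
    ma.length = n.toNat →
    (∀ p ∈ l, 0 ≤ p.1 ∧ p.1 < n) →
    (∀ k : Nat, k < n.toNat → d.get? (k : Int) = PySem.List.pyGetD ma (k : Int) none) →
    ∀ k : Nat, k < n.toNat →
      (l.foldl (fun d p => d.insert p.1 p.2) d).get? (k : Int)
        = PySem.List.pyGetD
            (l.foldl (fun ma p => PySem.List.pySetD ma p.1 (some p.2)) ma) (k : Int) none := by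
  intro l
  induction l with
  | nil => intro ma d _ _ hinv k hk; exact hinv k hk
  | cons p ps ih =>
    intro ma d hlen hr hinv k hk
    have hp := hr p List.mem_cons_self
    set j : Nat := p.1.toNat with hj
    have hjN : j < n.toNat := by omega
    have hkey : p.1 = ((j : Nat) : Int) := by omega
    have hset : PySem.List.pySetD ma ((j : Nat) : Int) (some p.2) = ma.set j (some p.2) := by
      simp
    simp only [List.foldl_cons, hkey, hset]
    refine ih (ma.set j (some p.2)) (d.insert ((j : Nat) : Int) p.2)
      (by rw [List.length_set]; exact hlen)
      (fun q hq => hr q (List.mem_cons_of_mem _ hq)) ?_ k hk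
    intro k' hk'
    rw [PySem.Dict.get?_insert]
    rw [show PySem.List.pyGetD (ma.set j (some p.2)) ((k' : Nat) : Int) none
        = PySem.List.pyGetD (PySem.List.pySetD ma ((j : Nat) : Int) (some p.2)) ((k' : Nat) : Int) none by
      rw [PySem.List.pySetD_natCast]]
    rw [PySem.List.pyGetD_pySetD_natCast _ _ _ _ _ (by omega)]
    by_cases hkj : k' = j
    · rw [if_pos (by omega), if_pos hkj]
    · rw [if_neg (by omega), if_neg hkj, hinv k' hk']

-- the build loop over `array` preserves the length of `max_arrays`
theorem pvMaLen (l : List (Int × Int)) :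
    ∀ (ma : List (Option Int)),
      (l.foldl (fun ma p => PySem.List.pySetD ma p.1 (some p.2)) ma).length = ma.length := by
  induction l with
  | nil => intro ma; rfl
  | cons p ps ih =>
    intro ma
    rw [List.foldl_cons, ih, PySem.List.length_pySetD]

-- every key of the dict built from in-range entries lies in [0, n)
theorem pvKeysRange (n : Int) :
    ∀ (l : List (Int × Int)) (d : PySem.Dict Int Int),
      (∀ p ∈ l, 0 ≤ p.1 ∧ p.1 < n) →
      (∀ q ∈ d.items, 0 ≤ q.1 ∧ q.1 < n) →
      ∀ q ∈ (l.foldl (fun d p => d.insert p.1 p.2) d).items,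
        0 ≤ q.1 ∧ q.1 < n := by
  intro l
  induction l with
  | nil => intro d _ h q hq; exact h q hq
  | cons p ps ih =>
    intro d hr h q hq
    rw [List.foldl_cons] at hq
    refine ih _ (fun r hrm => hr r (List.mem_cons_of_mem _ hrm)) ?_ q hq
    intro r hrr
    rcases (PySem.Dict.mem_items_insert _ _ _ _).1 hrr with rfl | ⟨hr', _⟩
    · exact hr p List.mem_cons_self
    · exact h r hr'

-- ===== VERDICT (by name: the statement is the Claim_ definition above) =====
theorem solution_spec : Claim_equal_solution := by
  unfold Claim_equal_solution
  intro n m array _hdom hpre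
  obtain ⟨hn, hr⟩ := hpre
  unfold Spec_solution
  show solution n m array = solution_alt n m array
  simp only [solution, solution_alt]
  rw [pvRightBridge, pvLeftBridge, pvBuildBridge, Array.toList_replicate, Array.toList_replicate]
  set N := n.toNat with hN
  set ma := array.foldl (fun ma p => PySem.List.pySetD ma p.1 (some p.2))
    (List.replicate N (none : Option Int)) with hma
  set d := array.foldl (fun d p => d.insert p.1 p.2)
    (PySem.Dict.empty (κ := Int) (ν := Int)) with hdd
  have hofList : PySem.Dict.ofList array = d := rfl
  set caps := d.insert (0 : Int) (0 : Int) with hcaps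
  set g : Nat → Option Int := fun k => PySem.List.pyGetD ma (k : Int) none with hgdef
  have hN1 : 1 ≤ N := by omega
  have hlen : ma.length = N := by
    rw [hma, pvMaLen]
    simp
  have hlink : ∀ k : Nat, k < N → d.get? (k : Int) = g k := by
    intro k hk
    rw [hdd, hgdef, hma]
    exact pvLink n hn array (List.replicate N none) PySem.Dict.empty (by simp [hN]) hr
      (fun k' hk' => by simp [PySem.Dict.get?_empty]) k hk
  have hkeysd : ∀ q ∈ d.items, 0 ≤ q.1 ∧ q.1 < n := by
    rw [hdd]
    exact pvKeysRange n array PySem.Dict.empty hr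
      (by intro q hq; simp [PySem.Dict.empty] at hq)
  have hkeys : ∀ q ∈ caps.items, 0 ≤ q.1 ∧ q.1 < n := by
    intro q hq
    rcases (PySem.Dict.mem_items_insert _ _ _ _).1 hq with rfl | ⟨hq', _⟩
    · constructor <;> omega
    · exact hkeysd q hq'
  have hnodupd : d.keys.Nodup := by
    rw [hdd]
    exact PySem.Dict.nodup_keys_foldl_insert_key array (fun p => p.1)
      (fun d p => p.2) _ PySem.Dict.nodup_keys_empty
  have hnodup : caps.keys.Nodup := PySem.Dict.nodup_keys_insert _ _ _ hnodupd
  -- lookups in caps: key 0 gives 0, any other key reads the surviving cap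
  have hcaps0 : caps.get? (0 : Int) = some 0 := PySem.Dict.get?_insert_self _ _ _
  have hcapsk : ∀ k : Nat, k ≠ 0 → k < N → caps.get? ((k : Nat) : Int) = g k := by
    intro k hk0 hkN
    rw [hcaps, PySem.Dict.get?_insert, if_neg (by omega)]
    exact hlink k hkN
  -- A side: the two passes compute pvR
  have hrep : List.replicate N (0 : Int) = (List.range N).map (fun k => if k < 1 then pvL g k else 0) := by
    apply List.ext_getElem
    · simp
    · intro k h1 h2
      simp only [List.getElem_replicate, List.getElem_map, List.getElem_range]
      by_cases hk0 : k = 0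
      · subst hk0; rw [if_pos (by omega)]; rfl
      · rw [if_neg (by omega)]
  have hleft := pvLeftPass n ma g (fun k => rfl) (N - 1) 1 (by omega) (by omega)
  simp only [Nat.cast_one] at hleft
  rw [← hN] at hleft
  have hinit2 : (List.range N).map (pvL g)
      = (List.range N).map (fun (k : Nat) => if (n - 2 : Int) < (k : Int) then pvR g N k else pvL g k) := by
    apply List.map_congr_left
    intro k hk
    have hkN := List.mem_range.1 hk
    by_cases h : (n - 2 : Int) < (k : Int)
    · rw [if_pos h]
      have hk1 : k = N - 1 := by omega
      rw [pvR, show N - 1 - k = 0 by omega]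
      rfl
    · rw [if_neg h]
  have hright := pvRightPass n g hn ((n - 1).toNat) (n - 2) (by omega) (by omega) (by omega)
  rw [← hN] at hright
  rw [hrep, hleft, hinit2, hright]
  -- B side: each position's min over the caps items is the closed-form pvM
  rw [hofList, ← hcaps]
  rw [show (PySem.List.pyRange 0 n 1) = (List.range N).map (fun (k : Nat) => (k : Int)) from by
    rw [show n = ((N : Nat) : Int) by omega]
    exact PySem.List.pyRange_zero_natCast N]
  rw [List.map_map]
  have hpt : ∀ k ∈ List.range N,
      ((fun i : Int => (PySem.List.min? (caps.items.map (fun jv => jv.2 + |i - jv.1|)) (fun x => x)).getD 0)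
        ∘ (fun k : Nat => (k : Int))) k = pvR g N k := by
    intro k hk
    have hkN := List.mem_range.1 hk
    simp only [Function.comp]
    set bl := caps.items.map (fun jv => jv.2 + |((k : Nat) : Int) - jv.1|) with hbl
    have hne : bl ≠ [] := by
      have : ((0 : Int), (0 : Int)) ∈ caps.items := PySem.Dict.mem_items_of_get?_eq_some caps hcaps0
      intro hnil
      rw [hbl] at hnil
      rcases List.map_eq_nil_iff.1 hnil with h
      rw [h] at this
      simp at this
    obtain ⟨hmem, hlb⟩ := pvMinChar bl hne
    rw [pvR, pvR_eq_M g N (N - 1 - k) k hkN rfl]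
    have h00 : ((0 : Int), (0 : Int)) ∈ caps.items := PySem.Dict.mem_items_of_get?_eq_some caps hcaps0
    apply le_antisymm
    · -- min over bl ≤ pvM: the min is a lower bound of the seed and of every sel-candidate
      apply le_pvOmin
      · -- the seed k is the candidate of the item (0, 0)
        have hmem0 : ((0 : Int) + |((k : Nat) : Int) - 0|) ∈ bl := by
          rw [hbl]
          exact List.mem_map.2 ⟨_, h00, rfl⟩
        have hle := hlb _ hmem0
        rwa [show (0 : Int) + |((k : Nat) : Int) - 0| = ((k : Nat) : Int) by
          rw [abs_of_nonneg (by omega)]; ring] at hle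
      · intro j hj y hs
        have hjN := List.mem_range.1 hj
        by_cases hj0 : j = 0
        · rw [hj0] at hs; simp [pvSelM] at hs
        · simp only [pvSelM, if_neg hj0] at hs
          rcases Option.map_eq_some_iff.1 hs with ⟨v, hv, hval⟩
          have hget : caps.get? ((j : Nat) : Int) = some v := by
            rw [hcapsk j hj0 hjN]; exact hv
          have hmemi : (((j : Nat) : Int), v) ∈ caps.items :=
            PySem.Dict.mem_items_of_get?_eq_some caps hget
          have hmemb : (v + |((k : Nat) : Int) - ((j : Nat) : Int)|) ∈ bl := by
            rw [hbl]
            exact List.mem_map.2 ⟨_, hmemi, rfl⟩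
          have hle := hlb _ hmemb
          rwa [hval] at hle
    · -- pvM ≤ min over bl: the min is the candidate of some caps item
      rcases List.mem_map.1 (hbl ▸ hmem) with ⟨jv, hjv, hval⟩
      have hbnd := hkeys jv hjv
      have hget : caps.get? jv.1 = some jv.2 := PySem.Dict.get?_of_mem_items caps hjv hnodup
      by_cases hj0 : jv.1 = 0
      · -- the item is (0, 0): its candidate is the seed k
        have hv0 : jv.2 = 0 := by
          rw [hj0, hcaps0] at hget
          exact (Option.some_injective _ hget).symm
        rw [← hval, hj0, hv0,
          show (0 : Int) + |((k : Nat) : Int) - 0| = ((k : Nat) : Int) by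
            rw [abs_of_nonneg (by omega)]; ring]
        exact pvOmin_le_init _ _ _
      · set j : Nat := jv.1.toNat with hj
        have hjN : j < N := by omega
        have hgj : g j = some jv.2 := by
          rw [← hcapsk j (by omega) hjN, show ((j : Nat) : Int) = jv.1 by omega]
          exact hget
        have hsm : pvSelM g k j = some (jv.2 + |((k : Nat) : Int) - ((j : Nat) : Int)|) := by
          simp [pvSelM, show j ≠ 0 by omega, hgj]
        rw [← hval, show (jv.1 : Int) = ((j : Nat) : Int) by omega]
        exact pvOmin_le_of_mem (List.mem_range.2 hjN) hsm
  rw [List.map_congr_left hpt]
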